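-- pv_equiv track=rewrite | github.com/Hothorak/Sujet-NSI--preuves-pratiques | sujetpratique_nsi/Sujet 16.py | recherche_indices_classement
-- ===== SOURCE A (Python) =====
-- def recherche_indices_classement(elt,tab):
--     t1=[]
--     t2=[]
--     t3=[]
--     for k in range(len(tab)):
--         if tab[k]<elt:
--             t1.append(k)
--         elif tab[k]==elt:
--             t2.append(k)
--         else:
--             t3.append(k)
--     return t1,t2,t3
-- ===== SOURCE B (Python) =====
-- def recherche_indices_classement(elt, tab):
--     t1 = [k for k, x in enumerate(tab) if x < elt]
--     t2 = [k for k, x in enumerate(tab) if x == elt]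
--     t3 = [k for k, x in enumerate(tab) if not (x < elt) and not (x == elt)]
--     return t1, t2, t3
-- ===== Notes on version B (the rewrite author's own statement) =====
-- stated objective: simpler
-- what changed: Replaces the single stateful loop that appends into three accumulators with three independent filtering comprehensions over enumerate(tab), the third mirroring A's else branch literally.
import Mathlib
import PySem

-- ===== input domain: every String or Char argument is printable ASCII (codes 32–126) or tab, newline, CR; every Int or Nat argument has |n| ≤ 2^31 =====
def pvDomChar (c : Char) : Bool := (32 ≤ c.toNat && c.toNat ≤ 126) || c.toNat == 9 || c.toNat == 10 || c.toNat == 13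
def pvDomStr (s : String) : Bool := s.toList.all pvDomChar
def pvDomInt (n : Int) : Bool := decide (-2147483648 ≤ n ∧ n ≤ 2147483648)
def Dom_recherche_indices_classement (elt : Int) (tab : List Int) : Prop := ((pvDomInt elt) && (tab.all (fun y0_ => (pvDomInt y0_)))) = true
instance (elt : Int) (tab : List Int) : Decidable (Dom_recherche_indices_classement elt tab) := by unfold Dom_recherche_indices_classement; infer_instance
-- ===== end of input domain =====

-- ===== PORT A =====
-- B replaces the one stateful loop by three independent filtering comprehensions (same cost, plainer).
-- tab[k] is always in range here (k from range(len(tab))), so pyGetD with default 0 is exact.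
def recherche_indices_classement (elt : Int) (tab : List Int) : List Int × List Int × List Int :=
  (PySem.List.pyRange 0 (PySem.List.len tab) 1).foldl
    (fun acc k =>
      let x := PySem.List.pyGetD tab k 0
      if x < elt then (acc.1 ++ [k], acc.2.1, acc.2.2)
      else if x = elt then (acc.1, acc.2.1 ++ [k], acc.2.2)
      else (acc.1, acc.2.1, acc.2.2 ++ [k]))
    ([], [], [])

-- ===== PORT B =====
def recherche_indices_classement_alt (elt : Int) (tab : List Int) : List Int × List Int × List Int :=
  (((PySem.List.enumerate tab 0).filter (fun p => p.2 < elt)).map (·.1),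
   ((PySem.List.enumerate tab 0).filter (fun p => p.2 = elt)).map (·.1),
   ((PySem.List.enumerate tab 0).filter (fun p => ¬ (p.2 < elt) ∧ ¬ (p.2 = elt))).map (·.1))

-- ===== PRECONDITION & SPEC =====
def Spec_recherche_indices_classement (elt : Int) (tab : List Int) (out : List Int × List Int × List Int) : Prop := out = recherche_indices_classement_alt elt tab
instance (elt : Int) (tab : List Int) (out : List Int × List Int × List Int) : Decidable (Spec_recherche_indices_classement elt tab out) := by unfold Spec_recherche_indices_classement; infer_instance

-- ===== CLAIM (what is proved, stated in full; the proofs are below) =====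
def Claim_equal_recherche_indices_classement : Prop := ∀ (elt : Int) (tab : List Int), Dom_recherche_indices_classement elt tab → Spec_recherche_indices_classement elt tab (recherche_indices_classement elt tab)

-- ===== LEMMAS AND PROOFS =====

-- ===== VERDICT (by name: the statement is the Claim_ definition above) =====
lemma rec_fold (elt : Int) (l : List (Int × Int)) (t1 t2 t3 : List Int) :
    l.foldl
      (fun (acc : List Int × List Int × List Int) (p : Int × Int) =>
        let x := p.2
        if x < elt then (acc.1 ++ [p.1], acc.2.1, acc.2.2)
        else if x = elt then (acc.1, acc.2.1 ++ [p.1], acc.2.2)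
        else (acc.1, acc.2.1, acc.2.2 ++ [p.1]))
      (t1, t2, t3)
    = (t1 ++ (l.filter (fun p => p.2 < elt)).map (·.1),
       t2 ++ (l.filter (fun p => p.2 = elt)).map (·.1),
       t3 ++ (l.filter (fun p => ¬ (p.2 < elt) ∧ ¬ (p.2 = elt))).map (·.1)) := by
  induction l generalizing t1 t2 t3 with
  | nil => simp
  | cons h t ih =>
    simp only [List.foldl_cons, List.filter_cons]
    by_cases h1 : h.2 < elt
    · have h2 : ¬ h.2 = elt := by omega
      simp [h1, h2, ih]
    · by_cases h2 : h.2 = elt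
      · simp [h2, ih]
      · simp [h1, h2, ih]

theorem recherche_indices_classement_spec : Claim_equal_recherche_indices_classement := by
  intro elt tab _
  unfold Spec_recherche_indices_classement recherche_indices_classement recherche_indices_classement_alt
  have h := rec_fold elt ((PySem.List.pyRange 0 (PySem.List.len tab) 1).map
      (fun j => (j, PySem.List.pyGetD tab j 0))) [] [] []
  rw [List.foldl_map] at h
  rw [h, ← PySem.List.enumerate_eq_map_pyRange tab 0]
  simp
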